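-- pv_equiv track=rewrite | github.com/Raiff1982/ashesinthedawn | Codette/codette_enhanced.py | _get_daw_context
-- ===== SOURCE A (Python) =====
-- from typing import List, Dict, Any
--
-- def _get_daw_context(prompt: str) -> Dict[str, Any]:
--     """Extract DAW context from prompt"""
--     prompt_lower = prompt.lower()
--     context = {
--         "category": "general",
--         "element": None,
--         "problem": None
--     }
--
--     # Detect category
--     if any(w in prompt_lower for w in ['eq', 'frequency', 'hz', 'boost', 'cut']):
--         context["category"] = "eq"
--     elif any(w in prompt_lower for w in ['compress', 'ratio', 'attack', 'release', 'threshold']):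
--         context["category"] = "compression"
--     elif any(w in prompt_lower for w in ['reverb', 'delay', 'echo', 'space', 'room']):
--         context["category"] = "spatial"
--     elif any(w in prompt_lower for w in ['gain', 'level', 'volume', 'loud', 'quiet', 'headroom']):
--         context["category"] = "gain_staging"
--     elif any(w in prompt_lower for w in ['pan', 'stereo', 'width', 'mono']):
--         context["category"] = "panning"
--     elif any(w in prompt_lower for w in ['mix', 'balance', 'blend']):
--         context["category"] = "mixing"
--
--     # Detect element
--     if any(w in prompt_lower for w in ['vocal', 'voice', 'sing']):
--         context["element"] = "vocals"
--     elif any(w in prompt_lower for w in ['bass', 'sub', 'low end', '808']):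
--         context["element"] = "bass"
--     elif any(w in prompt_lower for w in ['drum', 'kick', 'snare', 'hi-hat', 'cymbal']):
--         context["element"] = "drums"
--     elif any(w in prompt_lower for w in ['guitar', 'keys', 'piano', 'synth']):
--         context["element"] = "instruments"
--
--     # Detect problem
--     if any(w in prompt_lower for w in ['muddy', 'boomy', 'unclear']):
--         context["problem"] = "muddy"
--     elif any(w in prompt_lower for w in ['harsh', 'bright', 'sibilant', 'piercing']):
--         context["problem"] = "harsh"
--     elif any(w in prompt_lower for w in ['thin', 'weak', 'no body']):
--         context["problem"] = "thin"
--     elif any(w in prompt_lower for w in ['flat', 'no depth', '2d', 'boring']):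
--         context["problem"] = "no_depth"
--
--     return context
-- ===== SOURCE B (Python) =====
-- from typing import List, Dict, Any
--
-- # One flat keyword index: keyword -> (field, priority, label).
-- _KW = {
--     'eq': ('category', 0, 'eq'), 'frequency': ('category', 0, 'eq'),
--     'hz': ('category', 0, 'eq'), 'boost': ('category', 0, 'eq'), 'cut': ('category', 0, 'eq'),
--     'compress': ('category', 1, 'compression'), 'ratio': ('category', 1, 'compression'),
--     'attack': ('category', 1, 'compression'), 'release': ('category', 1, 'compression'),
--     'threshold': ('category', 1, 'compression'),
--     'reverb': ('category', 2, 'spatial'), 'delay': ('category', 2, 'spatial'),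
--     'echo': ('category', 2, 'spatial'), 'space': ('category', 2, 'spatial'), 'room': ('category', 2, 'spatial'),
--     'gain': ('category', 3, 'gain_staging'), 'level': ('category', 3, 'gain_staging'),
--     'volume': ('category', 3, 'gain_staging'), 'loud': ('category', 3, 'gain_staging'),
--     'quiet': ('category', 3, 'gain_staging'), 'headroom': ('category', 3, 'gain_staging'),
--     'pan': ('category', 4, 'panning'), 'stereo': ('category', 4, 'panning'),
--     'width': ('category', 4, 'panning'), 'mono': ('category', 4, 'panning'),
--     'mix': ('category', 5, 'mixing'), 'balance': ('category', 5, 'mixing'), 'blend': ('category', 5, 'mixing'),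
--     'vocal': ('element', 0, 'vocals'), 'voice': ('element', 0, 'vocals'), 'sing': ('element', 0, 'vocals'),
--     'bass': ('element', 1, 'bass'), 'sub': ('element', 1, 'bass'),
--     'low end': ('element', 1, 'bass'), '808': ('element', 1, 'bass'),
--     'drum': ('element', 2, 'drums'), 'kick': ('element', 2, 'drums'),
--     'snare': ('element', 2, 'drums'), 'hi-hat': ('element', 2, 'drums'), 'cymbal': ('element', 2, 'drums'),
--     'guitar': ('element', 3, 'instruments'), 'keys': ('element', 3, 'instruments'),
--     'piano': ('element', 3, 'instruments'), 'synth': ('element', 3, 'instruments'),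
--     'muddy': ('problem', 0, 'muddy'), 'boomy': ('problem', 0, 'muddy'), 'unclear': ('problem', 0, 'muddy'),
--     'harsh': ('problem', 1, 'harsh'), 'bright': ('problem', 1, 'harsh'),
--     'sibilant': ('problem', 1, 'harsh'), 'piercing': ('problem', 1, 'harsh'),
--     'thin': ('problem', 2, 'thin'), 'weak': ('problem', 2, 'thin'), 'no body': ('problem', 2, 'thin'),
--     'flat': ('problem', 3, 'no_depth'), 'no depth': ('problem', 3, 'no_depth'),
--     '2d': ('problem', 3, 'no_depth'), 'boring': ('problem', 3, 'no_depth'),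
-- }
--
-- def _best(pl, field):
--     # running minimum-priority match over the flat index
--     best = None
--     for kw, (f, rank, label) in _KW.items():
--         if f == field and kw in pl and (best is None or rank < best[0]):
--             best = (rank, label)
--     return best
--
-- def _get_daw_context(prompt: str) -> Dict[str, Any]:
--     pl = prompt.lower()
--     cat = _best(pl, 'category')
--     el = _best(pl, 'element')
--     pr = _best(pl, 'problem')
--     return {
--         "category": cat[1] if cat else "general",
--         "element": el[1] if el else None,
--         "problem": pr[1] if pr else None,
--     }
-- ===== Notes on version B (the rewrite author's own statement) =====
-- stated objective: alternative
-- what changed: Replaced the three if/elif keyword ladders with one flat keyword->(field,priority,label) index scanned with a running minimum-priority accumulator per field.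
import Mathlib
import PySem

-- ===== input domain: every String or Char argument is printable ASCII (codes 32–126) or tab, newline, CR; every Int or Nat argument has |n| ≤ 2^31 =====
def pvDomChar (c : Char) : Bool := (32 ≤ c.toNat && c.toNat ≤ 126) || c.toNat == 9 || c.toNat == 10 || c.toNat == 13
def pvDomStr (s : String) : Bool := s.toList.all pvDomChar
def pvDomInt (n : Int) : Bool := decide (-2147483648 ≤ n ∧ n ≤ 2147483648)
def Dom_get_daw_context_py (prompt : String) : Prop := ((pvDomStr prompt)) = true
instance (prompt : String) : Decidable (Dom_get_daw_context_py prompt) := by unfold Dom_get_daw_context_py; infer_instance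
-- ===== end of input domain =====

-- B replaces the three if/elif keyword ladders by one flat keyword → (field, priority, label)
-- index scanned with a running minimum-priority accumulator per field (objective: alternative).

-- ===== PORT A =====
def get_daw_context_py (prompt : String) : List (String × Option String) :=
  let pl := PySem.Str.lower prompt
  let context : PySem.Dict String (Option String) :=
    (((PySem.Dict.empty).insert "category" (some "general")).insert "element" none).insert "problem" none
  -- detect category
  let context :=
    if ["eq", "frequency", "hz", "boost", "cut"].any (fun w => PySem.Str.isIn w pl) then
      context.insert "category" (some "eq")
    else if ["compress", "ratio", "attack", "release", "threshold"].any (fun w => PySem.Str.isIn w pl) then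
      context.insert "category" (some "compression")
    else if ["reverb", "delay", "echo", "space", "room"].any (fun w => PySem.Str.isIn w pl) then
      context.insert "category" (some "spatial")
    else if ["gain", "level", "volume", "loud", "quiet", "headroom"].any (fun w => PySem.Str.isIn w pl) then
      context.insert "category" (some "gain_staging")
    else if ["pan", "stereo", "width", "mono"].any (fun w => PySem.Str.isIn w pl) then
      context.insert "category" (some "panning")
    else if ["mix", "balance", "blend"].any (fun w => PySem.Str.isIn w pl) then
      context.insert "category" (some "mixing")
    else context
  -- detect element
  let context :=
    if ["vocal", "voice", "sing"].any (fun w => PySem.Str.isIn w pl) then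
      context.insert "element" (some "vocals")
    else if ["bass", "sub", "low end", "808"].any (fun w => PySem.Str.isIn w pl) then
      context.insert "element" (some "bass")
    else if ["drum", "kick", "snare", "hi-hat", "cymbal"].any (fun w => PySem.Str.isIn w pl) then
      context.insert "element" (some "drums")
    else if ["guitar", "keys", "piano", "synth"].any (fun w => PySem.Str.isIn w pl) then
      context.insert "element" (some "instruments")
    else context
  -- detect problem
  let context :=
    if ["muddy", "boomy", "unclear"].any (fun w => PySem.Str.isIn w pl) then
      context.insert "problem" (some "muddy")
    else if ["harsh", "bright", "sibilant", "piercing"].any (fun w => PySem.Str.isIn w pl) then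
      context.insert "problem" (some "harsh")
    else if ["thin", "weak", "no body"].any (fun w => PySem.Str.isIn w pl) then
      context.insert "problem" (some "thin")
    else if ["flat", "no depth", "2d", "boring"].any (fun w => PySem.Str.isIn w pl) then
      context.insert "problem" (some "no_depth")
    else context
  context.items

-- ===== PORT B =====
-- the flat keyword index _KW of Source B, in its insertion order: (keyword, field, priority, label)
def pvKW : List (String × String × Nat × String) :=
  [("eq", "category", 0, "eq"), ("frequency", "category", 0, "eq"),
   ("hz", "category", 0, "eq"), ("boost", "category", 0, "eq"), ("cut", "category", 0, "eq"),
   ("compress", "category", 1, "compression"), ("ratio", "category", 1, "compression"),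
   ("attack", "category", 1, "compression"), ("release", "category", 1, "compression"),
   ("threshold", "category", 1, "compression"),
   ("reverb", "category", 2, "spatial"), ("delay", "category", 2, "spatial"),
   ("echo", "category", 2, "spatial"), ("space", "category", 2, "spatial"), ("room", "category", 2, "spatial"),
   ("gain", "category", 3, "gain_staging"), ("level", "category", 3, "gain_staging"),
   ("volume", "category", 3, "gain_staging"), ("loud", "category", 3, "gain_staging"),
   ("quiet", "category", 3, "gain_staging"), ("headroom", "category", 3, "gain_staging"),
   ("pan", "category", 4, "panning"), ("stereo", "category", 4, "panning"),
   ("width", "category", 4, "panning"), ("mono", "category", 4, "panning"),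
   ("mix", "category", 5, "mixing"), ("balance", "category", 5, "mixing"), ("blend", "category", 5, "mixing"),
   ("vocal", "element", 0, "vocals"), ("voice", "element", 0, "vocals"), ("sing", "element", 0, "vocals"),
   ("bass", "element", 1, "bass"), ("sub", "element", 1, "bass"),
   ("low end", "element", 1, "bass"), ("808", "element", 1, "bass"),
   ("drum", "element", 2, "drums"), ("kick", "element", 2, "drums"),
   ("snare", "element", 2, "drums"), ("hi-hat", "element", 2, "drums"), ("cymbal", "element", 2, "drums"),
   ("guitar", "element", 3, "instruments"), ("keys", "element", 3, "instruments"),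
   ("piano", "element", 3, "instruments"), ("synth", "element", 3, "instruments"),
   ("muddy", "problem", 0, "muddy"), ("boomy", "problem", 0, "muddy"), ("unclear", "problem", 0, "muddy"),
   ("harsh", "problem", 1, "harsh"), ("bright", "problem", 1, "harsh"),
   ("sibilant", "problem", 1, "harsh"), ("piercing", "problem", 1, "harsh"),
   ("thin", "problem", 2, "thin"), ("weak", "problem", 2, "thin"), ("no body", "problem", 2, "thin"),
   ("flat", "problem", 3, "no_depth"), ("no depth", "problem", 3, "no_depth"),
   ("2d", "problem", 3, "no_depth"), ("boring", "problem", 3, "no_depth")]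

-- one loop iteration of _best: keep the running minimum-priority match for `field`
def pvStep (pl field : String) (best : Option (Nat × String)) (e : String × String × Nat × String) :
    Option (Nat × String) :=
  if e.2.1 == field && PySem.Str.isIn e.1 pl
      && (match best with | none => true | some b => decide (e.2.2.1 < b.1)) then
    some (e.2.2.1, e.2.2.2)
  else best

def pvBest (pl field : String) : Option (Nat × String) :=
  pvKW.foldl (pvStep pl field) none

def get_daw_context_py_alt (prompt : String) : List (String × Option String) :=
  let pl := PySem.Str.lower prompt
  let cat := pvBest pl "category"
  let el := pvBest pl "element"
  let pr := pvBest pl "problem"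
  [("category", some (match cat with | some b => b.2 | none => "general")),
   ("element", el.map (·.2)),
   ("problem", pr.map (·.2))]

-- ===== PRECONDITION & SPEC =====
def Spec_get_daw_context_py (prompt : String) (out : List (String × Option String)) : Prop := out = get_daw_context_py_alt prompt
instance (prompt : String) (out : List (String × Option String)) : Decidable (Spec_get_daw_context_py prompt out) := by unfold Spec_get_daw_context_py; infer_instance

-- ===== CLAIM (what is proved, stated in full; the proofs are below) =====
def Claim_equal_get_daw_context_py : Prop := ∀ (prompt : String), Dom_get_daw_context_py prompt → Spec_get_daw_context_py prompt (get_daw_context_py prompt)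

-- ===== LEMMAS AND PROOFS =====
def pvBlock (f : String) (r : Nat) (lab : String) (ws : List String) :
    List (String × String × Nat × String) := ws.map (fun w => (w, f, r, lab))

-- once `some (i, lab)` is held, no remaining entry of priority ≥ i (for this field) can replace it
theorem pv_absorb (pl f lab : String) (i : Nat) (L : List (String × String × Nat × String))
    (h : ∀ e ∈ L, e.2.1 = f → i ≤ e.2.2.1) :
    L.foldl (pvStep pl f) (some (i, lab)) = some (i, lab) := by
  induction L with
  | nil => rfl
  | cons e L ih =>
    have hstep : pvStep pl f (some (i, lab)) e = some (i, lab) := by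
      rcases Decidable.em (e.2.1 = f) with hf | hf
      · have hle := h e (List.mem_cons_self) hf
        simp [pvStep, hf, Nat.not_lt.mpr hle]
      · simp [pvStep, hf]
    rw [List.foldl_cons, hstep]
    exact ih (fun e he hf => h e (List.mem_cons_of_mem _ he) hf)

-- scanning a block of keywords of its own field from an empty accumulator
theorem pv_block_none (pl f lab : String) (i : Nat) (ws : List String)
    (rest : List (String × String × Nat × String)) :
    (pvBlock f i lab ws ++ rest).foldl (pvStep pl f) none
    = if ws.any (fun w => PySem.Str.isIn w pl)
      then rest.foldl (pvStep pl f) ((pvBlock f i lab ws).foldl (pvStep pl f) none)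
      else rest.foldl (pvStep pl f) none := by
  rw [List.foldl_append]
  by_cases hw : ws.any (fun w => PySem.Str.isIn w pl)
  · rw [if_pos hw]
  · rw [if_neg hw]
    have : (pvBlock f i lab ws).foldl (pvStep pl f) none = none := by
      induction ws with
      | nil => rfl
      | cons w ws ih =>
        simp only [List.any_cons, Bool.or_eq_true, not_or] at hw
        have h' : PySem.Chars.isIn w.toList pl.toList = false := by simpa using hw.1
        have hstep : pvStep pl f none (w, f, i, lab) = none := by
          simp [pvStep, h']
        simp only [pvBlock, List.map_cons, List.foldl_cons, hstep]
        exact ih hw.2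
    rw [this]

-- a matching block sets exactly (i, lab)
theorem pv_block_hit (pl f lab : String) (i : Nat) (ws : List String)
    (hw : ws.any (fun w => PySem.Str.isIn w pl) = true) :
    (pvBlock f i lab ws).foldl (pvStep pl f) none = some (i, lab) := by
  induction ws with
  | nil => simp at hw
  | cons w ws ih =>
    simp only [pvBlock, List.map_cons, List.foldl_cons]
    by_cases h : PySem.Str.isIn w pl
    · have h' : PySem.Chars.isIn w.toList pl.toList = true := by simpa using h
      have hstep : pvStep pl f none (w, f, i, lab) = some (i, lab) := by
        simp [pvStep, h']
      rw [hstep]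
      exact pv_absorb pl f lab i _ (by intro e he _; rcases List.mem_map.mp he with ⟨x, _, rfl⟩; exact le_refl i)
    · have h' : PySem.Chars.isIn w.toList pl.toList = false := by simpa using h
      have hstep : pvStep pl f none (w, f, i, lab) = none := by simp [pvStep, h']
      rw [hstep]
      simp only [List.any_cons, h, Bool.false_or] at hw
      exact ih hw
-- a block of a foreign field is skipped from an empty accumulator
theorem pv_none_foreign (pl f f' lab : String) (i : Nat) (ws : List String)
    (rest : List (String × String × Nat × String)) (h : f' ≠ f) :
    (pvBlock f' i lab ws ++ rest).foldl (pvStep pl f) none = rest.foldl (pvStep pl f) none := by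
  rw [List.foldl_append]
  have : (pvBlock f' i lab ws).foldl (pvStep pl f) none = none := by
    induction ws with
    | nil => rfl
    | cons w ws ih =>
      have hstep : pvStep pl f none (w, f', i, lab) = none := by simp [pvStep, h]
      simp only [pvBlock, List.map_cons, List.foldl_cons, hstep]
      exact ih
  rw [this]

theorem pv_best_cat (pl : String) : pvBest pl "category" =
    (if ["eq", "frequency", "hz", "boost", "cut"].any (fun w => PySem.Str.isIn w pl) then some (0, "eq")
     else if ["compress", "ratio", "attack", "release", "threshold"].any (fun w => PySem.Str.isIn w pl) then some (1, "compression")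
     else if ["reverb", "delay", "echo", "space", "room"].any (fun w => PySem.Str.isIn w pl) then some (2, "spatial")
     else if ["gain", "level", "volume", "loud", "quiet", "headroom"].any (fun w => PySem.Str.isIn w pl) then some (3, "gain_staging")
     else if ["pan", "stereo", "width", "mono"].any (fun w => PySem.Str.isIn w pl) then some (4, "panning")
     else if ["mix", "balance", "blend"].any (fun w => PySem.Str.isIn w pl) then some (5, "mixing")
     else none) := by
  have hKW : pvKW =
      pvBlock "category" 0 "eq" ["eq", "frequency", "hz", "boost", "cut"] ++
      (pvBlock "category" 1 "compression" ["compress", "ratio", "attack", "release", "threshold"] ++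
      (pvBlock "category" 2 "spatial" ["reverb", "delay", "echo", "space", "room"] ++
      (pvBlock "category" 3 "gain_staging" ["gain", "level", "volume", "loud", "quiet", "headroom"] ++
      (pvBlock "category" 4 "panning" ["pan", "stereo", "width", "mono"] ++
      (pvBlock "category" 5 "mixing" ["mix", "balance", "blend"] ++
      (pvBlock "element" 0 "vocals" ["vocal", "voice", "sing"] ++
      (pvBlock "element" 1 "bass" ["bass", "sub", "low end", "808"] ++
      (pvBlock "element" 2 "drums" ["drum", "kick", "snare", "hi-hat", "cymbal"] ++
      (pvBlock "element" 3 "instruments" ["guitar", "keys", "piano", "synth"] ++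
      (pvBlock "problem" 0 "muddy" ["muddy", "boomy", "unclear"] ++
      (pvBlock "problem" 1 "harsh" ["harsh", "bright", "sibilant", "piercing"] ++
      (pvBlock "problem" 2 "thin" ["thin", "weak", "no body"] ++
      (pvBlock "problem" 3 "no_depth" ["flat", "no depth", "2d", "boring"] ++ []))))))))))))) := by rfl
  unfold pvBest
  rw [hKW]
  by_cases h0 : (["eq", "frequency", "hz", "boost", "cut"].any (fun w => PySem.Str.isIn w pl)) = true
  · rw [pv_block_none, if_pos h0, pv_block_hit pl _ _ _ _ h0, if_pos h0]
    exact pv_absorb pl _ _ _ _ (by decide)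
  · rw [pv_block_none, if_neg h0, if_neg h0]
    by_cases h1 : (["compress", "ratio", "attack", "release", "threshold"].any (fun w => PySem.Str.isIn w pl)) = true
    · rw [pv_block_none, if_pos h1, pv_block_hit pl _ _ _ _ h1, if_pos h1]
      exact pv_absorb pl _ _ _ _ (by decide)
    · rw [pv_block_none, if_neg h1, if_neg h1]
      by_cases h2 : (["reverb", "delay", "echo", "space", "room"].any (fun w => PySem.Str.isIn w pl)) = true
      · rw [pv_block_none, if_pos h2, pv_block_hit pl _ _ _ _ h2, if_pos h2]
        exact pv_absorb pl _ _ _ _ (by decide)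
      · rw [pv_block_none, if_neg h2, if_neg h2]
        by_cases h3 : (["gain", "level", "volume", "loud", "quiet", "headroom"].any (fun w => PySem.Str.isIn w pl)) = true
        · rw [pv_block_none, if_pos h3, pv_block_hit pl _ _ _ _ h3, if_pos h3]
          exact pv_absorb pl _ _ _ _ (by decide)
        · rw [pv_block_none, if_neg h3, if_neg h3]
          by_cases h4 : (["pan", "stereo", "width", "mono"].any (fun w => PySem.Str.isIn w pl)) = true
          · rw [pv_block_none, if_pos h4, pv_block_hit pl _ _ _ _ h4, if_pos h4]
            exact pv_absorb pl _ _ _ _ (by decide)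
          · rw [pv_block_none, if_neg h4, if_neg h4]
            by_cases h5 : (["mix", "balance", "blend"].any (fun w => PySem.Str.isIn w pl)) = true
            · rw [pv_block_none, if_pos h5, pv_block_hit pl _ _ _ _ h5, if_pos h5]
              exact pv_absorb pl _ _ _ _ (by decide)
            · rw [pv_block_none, if_neg h5, if_neg h5]
              rw [pv_none_foreign pl _ _ _ _ _ _ (by decide), pv_none_foreign pl _ _ _ _ _ _ (by decide),
                  pv_none_foreign pl _ _ _ _ _ _ (by decide), pv_none_foreign pl _ _ _ _ _ _ (by decide),
                  pv_none_foreign pl _ _ _ _ _ _ (by decide), pv_none_foreign pl _ _ _ _ _ _ (by decide),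
                  pv_none_foreign pl _ _ _ _ _ _ (by decide), pv_none_foreign pl _ _ _ _ _ _ (by decide)]
              rfl

theorem pv_best_el (pl : String) : pvBest pl "element" =
    (if ["vocal", "voice", "sing"].any (fun w => PySem.Str.isIn w pl) then some (0, "vocals")
     else if ["bass", "sub", "low end", "808"].any (fun w => PySem.Str.isIn w pl) then some (1, "bass")
     else if ["drum", "kick", "snare", "hi-hat", "cymbal"].any (fun w => PySem.Str.isIn w pl) then some (2, "drums")
     else if ["guitar", "keys", "piano", "synth"].any (fun w => PySem.Str.isIn w pl) then some (3, "instruments")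
     else none) := by
  have hKW : pvKW =
      pvBlock "category" 0 "eq" ["eq", "frequency", "hz", "boost", "cut"] ++
      (pvBlock "category" 1 "compression" ["compress", "ratio", "attack", "release", "threshold"] ++
      (pvBlock "category" 2 "spatial" ["reverb", "delay", "echo", "space", "room"] ++
      (pvBlock "category" 3 "gain_staging" ["gain", "level", "volume", "loud", "quiet", "headroom"] ++
      (pvBlock "category" 4 "panning" ["pan", "stereo", "width", "mono"] ++
      (pvBlock "category" 5 "mixing" ["mix", "balance", "blend"] ++
      (pvBlock "element" 0 "vocals" ["vocal", "voice", "sing"] ++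
      (pvBlock "element" 1 "bass" ["bass", "sub", "low end", "808"] ++
      (pvBlock "element" 2 "drums" ["drum", "kick", "snare", "hi-hat", "cymbal"] ++
      (pvBlock "element" 3 "instruments" ["guitar", "keys", "piano", "synth"] ++
      (pvBlock "problem" 0 "muddy" ["muddy", "boomy", "unclear"] ++
      (pvBlock "problem" 1 "harsh" ["harsh", "bright", "sibilant", "piercing"] ++
      (pvBlock "problem" 2 "thin" ["thin", "weak", "no body"] ++
      (pvBlock "problem" 3 "no_depth" ["flat", "no depth", "2d", "boring"] ++ []))))))))))))) := by rfl
  unfold pvBest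
  rw [hKW]
  rw [pv_none_foreign pl _ _ _ _ _ _ (by decide), pv_none_foreign pl _ _ _ _ _ _ (by decide),
      pv_none_foreign pl _ _ _ _ _ _ (by decide), pv_none_foreign pl _ _ _ _ _ _ (by decide),
      pv_none_foreign pl _ _ _ _ _ _ (by decide), pv_none_foreign pl _ _ _ _ _ _ (by decide)]
  by_cases h0 : (["vocal", "voice", "sing"].any (fun w => PySem.Str.isIn w pl)) = true
  · rw [pv_block_none, if_pos h0, pv_block_hit pl _ _ _ _ h0, if_pos h0]
    exact pv_absorb pl _ _ _ _ (by decide)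
  · rw [pv_block_none, if_neg h0, if_neg h0]
    by_cases h1 : (["bass", "sub", "low end", "808"].any (fun w => PySem.Str.isIn w pl)) = true
    · rw [pv_block_none, if_pos h1, pv_block_hit pl _ _ _ _ h1, if_pos h1]
      exact pv_absorb pl _ _ _ _ (by decide)
    · rw [pv_block_none, if_neg h1, if_neg h1]
      by_cases h2 : (["drum", "kick", "snare", "hi-hat", "cymbal"].any (fun w => PySem.Str.isIn w pl)) = true
      · rw [pv_block_none, if_pos h2, pv_block_hit pl _ _ _ _ h2, if_pos h2]
        exact pv_absorb pl _ _ _ _ (by decide)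
      · rw [pv_block_none, if_neg h2, if_neg h2]
        by_cases h3 : (["guitar", "keys", "piano", "synth"].any (fun w => PySem.Str.isIn w pl)) = true
        · rw [pv_block_none, if_pos h3, pv_block_hit pl _ _ _ _ h3, if_pos h3]
          exact pv_absorb pl _ _ _ _ (by decide)
        · rw [pv_block_none, if_neg h3, if_neg h3]
          rw [pv_none_foreign pl _ _ _ _ _ _ (by decide), pv_none_foreign pl _ _ _ _ _ _ (by decide),
              pv_none_foreign pl _ _ _ _ _ _ (by decide), pv_none_foreign pl _ _ _ _ _ _ (by decide)]
          rfl

theorem pv_best_pr (pl : String) : pvBest pl "problem" =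
    (if ["muddy", "boomy", "unclear"].any (fun w => PySem.Str.isIn w pl) then some (0, "muddy")
     else if ["harsh", "bright", "sibilant", "piercing"].any (fun w => PySem.Str.isIn w pl) then some (1, "harsh")
     else if ["thin", "weak", "no body"].any (fun w => PySem.Str.isIn w pl) then some (2, "thin")
     else if ["flat", "no depth", "2d", "boring"].any (fun w => PySem.Str.isIn w pl) then some (3, "no_depth")
     else none) := by
  have hKW : pvKW =
      pvBlock "category" 0 "eq" ["eq", "frequency", "hz", "boost", "cut"] ++
      (pvBlock "category" 1 "compression" ["compress", "ratio", "attack", "release", "threshold"] ++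
      (pvBlock "category" 2 "spatial" ["reverb", "delay", "echo", "space", "room"] ++
      (pvBlock "category" 3 "gain_staging" ["gain", "level", "volume", "loud", "quiet", "headroom"] ++
      (pvBlock "category" 4 "panning" ["pan", "stereo", "width", "mono"] ++
      (pvBlock "category" 5 "mixing" ["mix", "balance", "blend"] ++
      (pvBlock "element" 0 "vocals" ["vocal", "voice", "sing"] ++
      (pvBlock "element" 1 "bass" ["bass", "sub", "low end", "808"] ++
      (pvBlock "element" 2 "drums" ["drum", "kick", "snare", "hi-hat", "cymbal"] ++
      (pvBlock "element" 3 "instruments" ["guitar", "keys", "piano", "synth"] ++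
      (pvBlock "problem" 0 "muddy" ["muddy", "boomy", "unclear"] ++
      (pvBlock "problem" 1 "harsh" ["harsh", "bright", "sibilant", "piercing"] ++
      (pvBlock "problem" 2 "thin" ["thin", "weak", "no body"] ++
      (pvBlock "problem" 3 "no_depth" ["flat", "no depth", "2d", "boring"] ++ []))))))))))))) := by rfl
  unfold pvBest
  rw [hKW]
  rw [pv_none_foreign pl _ _ _ _ _ _ (by decide), pv_none_foreign pl _ _ _ _ _ _ (by decide),
      pv_none_foreign pl _ _ _ _ _ _ (by decide), pv_none_foreign pl _ _ _ _ _ _ (by decide),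
      pv_none_foreign pl _ _ _ _ _ _ (by decide), pv_none_foreign pl _ _ _ _ _ _ (by decide),
      pv_none_foreign pl _ _ _ _ _ _ (by decide), pv_none_foreign pl _ _ _ _ _ _ (by decide),
      pv_none_foreign pl _ _ _ _ _ _ (by decide), pv_none_foreign pl _ _ _ _ _ _ (by decide)]
  by_cases h0 : (["muddy", "boomy", "unclear"].any (fun w => PySem.Str.isIn w pl)) = true
  · rw [pv_block_none, if_pos h0, pv_block_hit pl _ _ _ _ h0, if_pos h0]
    exact pv_absorb pl _ _ _ _ (by decide)
  · rw [pv_block_none, if_neg h0, if_neg h0]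
    by_cases h1 : (["harsh", "bright", "sibilant", "piercing"].any (fun w => PySem.Str.isIn w pl)) = true
    · rw [pv_block_none, if_pos h1, pv_block_hit pl _ _ _ _ h1, if_pos h1]
      exact pv_absorb pl _ _ _ _ (by decide)
    · rw [pv_block_none, if_neg h1, if_neg h1]
      by_cases h2 : (["thin", "weak", "no body"].any (fun w => PySem.Str.isIn w pl)) = true
      · rw [pv_block_none, if_pos h2, pv_block_hit pl _ _ _ _ h2, if_pos h2]
        exact pv_absorb pl _ _ _ _ (by decide)
      · rw [pv_block_none, if_neg h2, if_neg h2]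
        by_cases h3 : (["flat", "no depth", "2d", "boring"].any (fun w => PySem.Str.isIn w pl)) = true
        · rw [pv_block_none, if_pos h3, pv_block_hit pl _ _ _ _ h3, if_pos h3]
          exact pv_absorb pl _ _ _ _ (by decide)
        · rw [pv_block_none, if_neg h3, if_neg h3]
          rfl

-- the per-field values both programs produce, as one nested if over the same tests
theorem pv_cat_label (pl : String) :
    (match (if ["eq", "frequency", "hz", "boost", "cut"].any (fun w => PySem.Str.isIn w pl) then some ((0:Nat), "eq")
     else if ["compress", "ratio", "attack", "release", "threshold"].any (fun w => PySem.Str.isIn w pl) then some (1, "compression")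
     else if ["reverb", "delay", "echo", "space", "room"].any (fun w => PySem.Str.isIn w pl) then some (2, "spatial")
     else if ["gain", "level", "volume", "loud", "quiet", "headroom"].any (fun w => PySem.Str.isIn w pl) then some (3, "gain_staging")
     else if ["pan", "stereo", "width", "mono"].any (fun w => PySem.Str.isIn w pl) then some (4, "panning")
     else if ["mix", "balance", "blend"].any (fun w => PySem.Str.isIn w pl) then some (5, "mixing")
     else none) with | some b => b.2 | none => "general")
    = (if ["eq", "frequency", "hz", "boost", "cut"].any (fun w => PySem.Str.isIn w pl) then "eq"
     else if ["compress", "ratio", "attack", "release", "threshold"].any (fun w => PySem.Str.isIn w pl) then "compression"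
     else if ["reverb", "delay", "echo", "space", "room"].any (fun w => PySem.Str.isIn w pl) then "spatial"
     else if ["gain", "level", "volume", "loud", "quiet", "headroom"].any (fun w => PySem.Str.isIn w pl) then "gain_staging"
     else if ["pan", "stereo", "width", "mono"].any (fun w => PySem.Str.isIn w pl) then "panning"
     else if ["mix", "balance", "blend"].any (fun w => PySem.Str.isIn w pl) then "mixing"
     else "general") := by split_ifs <;> rfl

theorem pv_el_label (pl : String) :
    (Option.map (fun b => b.2) (if ["vocal", "voice", "sing"].any (fun w => PySem.Str.isIn w pl) then some ((0:Nat), "vocals")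
     else if ["bass", "sub", "low end", "808"].any (fun w => PySem.Str.isIn w pl) then some (1, "bass")
     else if ["drum", "kick", "snare", "hi-hat", "cymbal"].any (fun w => PySem.Str.isIn w pl) then some (2, "drums")
     else if ["guitar", "keys", "piano", "synth"].any (fun w => PySem.Str.isIn w pl) then some (3, "instruments")
     else none))
    = (if ["vocal", "voice", "sing"].any (fun w => PySem.Str.isIn w pl) then some "vocals"
     else if ["bass", "sub", "low end", "808"].any (fun w => PySem.Str.isIn w pl) then some "bass"
     else if ["drum", "kick", "snare", "hi-hat", "cymbal"].any (fun w => PySem.Str.isIn w pl) then some "drums"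
     else if ["guitar", "keys", "piano", "synth"].any (fun w => PySem.Str.isIn w pl) then some "instruments"
     else none) := by split_ifs <;> rfl

theorem pv_pr_label (pl : String) :
    (Option.map (fun b => b.2) (if ["muddy", "boomy", "unclear"].any (fun w => PySem.Str.isIn w pl) then some ((0:Nat), "muddy")
     else if ["harsh", "bright", "sibilant", "piercing"].any (fun w => PySem.Str.isIn w pl) then some (1, "harsh")
     else if ["thin", "weak", "no body"].any (fun w => PySem.Str.isIn w pl) then some (2, "thin")
     else if ["flat", "no depth", "2d", "boring"].any (fun w => PySem.Str.isIn w pl) then some (3, "no_depth")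
     else none))
    = (if ["muddy", "boomy", "unclear"].any (fun w => PySem.Str.isIn w pl) then some "muddy"
     else if ["harsh", "bright", "sibilant", "piercing"].any (fun w => PySem.Str.isIn w pl) then some "harsh"
     else if ["thin", "weak", "no body"].any (fun w => PySem.Str.isIn w pl) then some "thin"
     else if ["flat", "no depth", "2d", "boring"].any (fun w => PySem.Str.isIn w pl) then some "no_depth"
     else none) := by split_ifs <;> rfl

def pvD0 : PySem.Dict String (Option String) :=
  (((PySem.Dict.empty).insert "category" (some "general")).insert "element" none).insert "problem" none

theorem pv_cat_items (pl : String) :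
    (if ["eq", "frequency", "hz", "boost", "cut"].any (fun w => PySem.Str.isIn w pl) then
      pvD0.insert "category" (some "eq")
    else if ["compress", "ratio", "attack", "release", "threshold"].any (fun w => PySem.Str.isIn w pl) then
      pvD0.insert "category" (some "compression")
    else if ["reverb", "delay", "echo", "space", "room"].any (fun w => PySem.Str.isIn w pl) then
      pvD0.insert "category" (some "spatial")
    else if ["gain", "level", "volume", "loud", "quiet", "headroom"].any (fun w => PySem.Str.isIn w pl) then
      pvD0.insert "category" (some "gain_staging")
    else if ["pan", "stereo", "width", "mono"].any (fun w => PySem.Str.isIn w pl) then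
      pvD0.insert "category" (some "panning")
    else if ["mix", "balance", "blend"].any (fun w => PySem.Str.isIn w pl) then
      pvD0.insert "category" (some "mixing")
    else pvD0)
    = PySem.Dict.mk [("category", some (if ["eq", "frequency", "hz", "boost", "cut"].any (fun w => PySem.Str.isIn w pl) then "eq"
     else if ["compress", "ratio", "attack", "release", "threshold"].any (fun w => PySem.Str.isIn w pl) then "compression"
     else if ["reverb", "delay", "echo", "space", "room"].any (fun w => PySem.Str.isIn w pl) then "spatial"
     else if ["gain", "level", "volume", "loud", "quiet", "headroom"].any (fun w => PySem.Str.isIn w pl) then "gain_staging"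
     else if ["pan", "stereo", "width", "mono"].any (fun w => PySem.Str.isIn w pl) then "panning"
     else if ["mix", "balance", "blend"].any (fun w => PySem.Str.isIn w pl) then "mixing"
     else "general")), ("element", none), ("problem", none)] := by
  split_ifs <;> rfl

theorem pv_elem_items (pl : String) (c : Option String) :
    (if ["vocal", "voice", "sing"].any (fun w => PySem.Str.isIn w pl) then
      (PySem.Dict.mk [("category", c), ("element", (none : Option String)), ("problem", none)]).insert "element" (some "vocals")
    else if ["bass", "sub", "low end", "808"].any (fun w => PySem.Str.isIn w pl) then
      (PySem.Dict.mk [("category", c), ("element", none), ("problem", none)]).insert "element" (some "bass")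
    else if ["drum", "kick", "snare", "hi-hat", "cymbal"].any (fun w => PySem.Str.isIn w pl) then
      (PySem.Dict.mk [("category", c), ("element", none), ("problem", none)]).insert "element" (some "drums")
    else if ["guitar", "keys", "piano", "synth"].any (fun w => PySem.Str.isIn w pl) then
      (PySem.Dict.mk [("category", c), ("element", none), ("problem", none)]).insert "element" (some "instruments")
    else PySem.Dict.mk [("category", c), ("element", none), ("problem", none)])
    = PySem.Dict.mk [("category", c), ("element",
       if ["vocal", "voice", "sing"].any (fun w => PySem.Str.isIn w pl) then some "vocals"
       else if ["bass", "sub", "low end", "808"].any (fun w => PySem.Str.isIn w pl) then some "bass"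
       else if ["drum", "kick", "snare", "hi-hat", "cymbal"].any (fun w => PySem.Str.isIn w pl) then some "drums"
       else if ["guitar", "keys", "piano", "synth"].any (fun w => PySem.Str.isIn w pl) then some "instruments"
       else none), ("problem", none)] := by
  split_ifs <;> rfl

theorem pv_prob_items (pl : String) (c e : Option String) :
    (if ["muddy", "boomy", "unclear"].any (fun w => PySem.Str.isIn w pl) then
      (PySem.Dict.mk [("category", c), ("element", e), ("problem", (none : Option String))]).insert "problem" (some "muddy")
    else if ["harsh", "bright", "sibilant", "piercing"].any (fun w => PySem.Str.isIn w pl) then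
      (PySem.Dict.mk [("category", c), ("element", e), ("problem", none)]).insert "problem" (some "harsh")
    else if ["thin", "weak", "no body"].any (fun w => PySem.Str.isIn w pl) then
      (PySem.Dict.mk [("category", c), ("element", e), ("problem", none)]).insert "problem" (some "thin")
    else if ["flat", "no depth", "2d", "boring"].any (fun w => PySem.Str.isIn w pl) then
      (PySem.Dict.mk [("category", c), ("element", e), ("problem", none)]).insert "problem" (some "no_depth")
    else PySem.Dict.mk [("category", c), ("element", e), ("problem", none)])
    = PySem.Dict.mk [("category", c), ("element", e), ("problem",
       if ["muddy", "boomy", "unclear"].any (fun w => PySem.Str.isIn w pl) then some "muddy"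
       else if ["harsh", "bright", "sibilant", "piercing"].any (fun w => PySem.Str.isIn w pl) then some "harsh"
       else if ["thin", "weak", "no body"].any (fun w => PySem.Str.isIn w pl) then some "thin"
       else if ["flat", "no depth", "2d", "boring"].any (fun w => PySem.Str.isIn w pl) then some "no_depth"
       else none)] := by
  split_ifs <;> rfl

-- ===== VERDICT (by name: the statement is the Claim_ definition above) =====
theorem get_daw_context_py_spec : Claim_equal_get_daw_context_py := by
  intro prompt _
  unfold Spec_get_daw_context_py
  show get_daw_context_py prompt = get_daw_context_py_alt prompt
  rw [get_daw_context_py]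
  rw [show (((PySem.Dict.empty).insert "category" (some "general")).insert "element" none).insert "problem" none = pvD0 from rfl]
  rw [pv_cat_items, pv_elem_items, pv_prob_items]
  rw [get_daw_context_py_alt]
  rw [pv_best_cat, pv_best_el, pv_best_pr, pv_cat_label, pv_el_label, pv_pr_label]
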